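-- pv_equiv track=rewrite | github.com/SillySilk/pans_cookbook | ui/simple_validation.py | _guess_ingredient_category
-- ===== SOURCE A (Python) =====
-- def _guess_ingredient_category(ingredient_name: str) -> str:
--     """Guess ingredient category for new ingredients"""
--     name_lower = ingredient_name.lower()
--
--     # Simple categorization rules
--     if any(word in name_lower for word in ['chicken', 'beef', 'pork', 'fish', 'turkey', 'bacon']):
--         return 'protein'
--     elif any(word in name_lower for word in ['milk', 'cheese', 'butter', 'cream', 'yogurt']):
--         return 'dairy'
--     elif any(word in name_lower for word in ['tomato', 'onion', 'carrot', 'celery', 'pepper']):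
--         return 'vegetable'
--     elif any(word in name_lower for word in ['flour', 'rice', 'pasta', 'bread', 'oats']):
--         return 'grain'
--     elif any(word in name_lower for word in ['oil', 'olive oil', 'coconut oil']):
--         return 'oil'
--     elif any(word in name_lower for word in ['salt', 'pepper', 'garlic', 'basil', 'oregano']):
--         return 'seasoning'
--     elif any(word in name_lower for word in ['sugar', 'honey', 'syrup']):
--         return 'sweetener'
--     else:
--         return 'other'
-- ===== SOURCE B (Python) =====
-- # Single flat pass over a keyword table in reverse priority order, overwriting
-- # the result: the last matching keyword (highest priority) wins. No early
-- # return, no per-category any() scan.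
-- _KEYWORDS = [
--     ('sugar', 'sweetener'), ('honey', 'sweetener'), ('syrup', 'sweetener'),
--     ('salt', 'seasoning'), ('pepper', 'seasoning'), ('garlic', 'seasoning'),
--     ('basil', 'seasoning'), ('oregano', 'seasoning'),
--     ('oil', 'oil'), ('olive oil', 'oil'), ('coconut oil', 'oil'),
--     ('flour', 'grain'), ('rice', 'grain'), ('pasta', 'grain'),
--     ('bread', 'grain'), ('oats', 'grain'),
--     ('tomato', 'vegetable'), ('onion', 'vegetable'), ('carrot', 'vegetable'),
--     ('celery', 'vegetable'), ('pepper', 'vegetable'),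
--     ('milk', 'dairy'), ('cheese', 'dairy'), ('butter', 'dairy'),
--     ('cream', 'dairy'), ('yogurt', 'dairy'),
--     ('chicken', 'protein'), ('beef', 'protein'), ('pork', 'protein'),
--     ('fish', 'protein'), ('turkey', 'protein'), ('bacon', 'protein'),
-- ]
--
--
-- def _guess_ingredient_category(ingredient_name: str) -> str:
--     name_lower = ingredient_name.lower()
--     category = 'other'
--     for word, cat in _KEYWORDS:
--         if word in name_lower:
--             category = cat
--     return category
-- ===== Notes on version B (the rewrite author's own statement) =====
-- stated objective: alternative
-- what changed: Replaces the if/elif chain of per-category any() scans with one flat pass over a keyword-to-category table in reverse priority order, overwriting an accumulator so the last (highest-priority) matching keyword wins.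
import Mathlib
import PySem

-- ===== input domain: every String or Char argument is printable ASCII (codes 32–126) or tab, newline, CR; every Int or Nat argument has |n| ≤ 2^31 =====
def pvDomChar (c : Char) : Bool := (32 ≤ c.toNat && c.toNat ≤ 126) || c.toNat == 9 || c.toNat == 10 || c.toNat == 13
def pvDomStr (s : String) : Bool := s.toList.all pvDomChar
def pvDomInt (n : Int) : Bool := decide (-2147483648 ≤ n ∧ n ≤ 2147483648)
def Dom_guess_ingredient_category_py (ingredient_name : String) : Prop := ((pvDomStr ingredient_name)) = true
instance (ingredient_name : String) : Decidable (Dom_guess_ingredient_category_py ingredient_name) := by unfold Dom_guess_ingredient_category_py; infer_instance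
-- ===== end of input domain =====

-- B replaces A's if/elif chain of per-category any() scans with one flat pass over a
-- keyword→category table in reverse priority order, overwriting an accumulator (alternative).

-- ===== PORT A =====
def guess_ingredient_category_py (ingredient_name : String) : String :=
  let name_lower := PySem.Str.lower ingredient_name
  if ["chicken", "beef", "pork", "fish", "turkey", "bacon"].any (fun w => PySem.Str.isIn w name_lower) then "protein"
  else if ["milk", "cheese", "butter", "cream", "yogurt"].any (fun w => PySem.Str.isIn w name_lower) then "dairy"
  else if ["tomato", "onion", "carrot", "celery", "pepper"].any (fun w => PySem.Str.isIn w name_lower) then "vegetable"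
  else if ["flour", "rice", "pasta", "bread", "oats"].any (fun w => PySem.Str.isIn w name_lower) then "grain"
  else if ["oil", "olive oil", "coconut oil"].any (fun w => PySem.Str.isIn w name_lower) then "oil"
  else if ["salt", "pepper", "garlic", "basil", "oregano"].any (fun w => PySem.Str.isIn w name_lower) then "seasoning"
  else if ["sugar", "honey", "syrup"].any (fun w => PySem.Str.isIn w name_lower) then "sweetener"
  else "other"

-- ===== PORT B =====
def pvKeywords : List (String × String) :=
  [("sugar", "sweetener"), ("honey", "sweetener"), ("syrup", "sweetener"),
   ("salt", "seasoning"), ("pepper", "seasoning"), ("garlic", "seasoning"),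
   ("basil", "seasoning"), ("oregano", "seasoning"),
   ("oil", "oil"), ("olive oil", "oil"), ("coconut oil", "oil"),
   ("flour", "grain"), ("rice", "grain"), ("pasta", "grain"),
   ("bread", "grain"), ("oats", "grain"),
   ("tomato", "vegetable"), ("onion", "vegetable"), ("carrot", "vegetable"),
   ("celery", "vegetable"), ("pepper", "vegetable"),
   ("milk", "dairy"), ("cheese", "dairy"), ("butter", "dairy"),
   ("cream", "dairy"), ("yogurt", "dairy"),
   ("chicken", "protein"), ("beef", "protein"), ("pork", "protein"),
   ("fish", "protein"), ("turkey", "protein"), ("bacon", "protein")]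

def guess_ingredient_category_py_alt (ingredient_name : String) : String :=
  let name_lower := PySem.Str.lower ingredient_name
  pvKeywords.foldl
    (fun category p => if PySem.Str.isIn p.1 name_lower then p.2 else category)
    "other"

-- ===== PRECONDITION & SPEC =====
def Spec_guess_ingredient_category_py (ingredient_name : String) (out : String) : Prop := out = guess_ingredient_category_py_alt ingredient_name
instance (ingredient_name : String) (out : String) : Decidable (Spec_guess_ingredient_category_py ingredient_name out) := by unfold Spec_guess_ingredient_category_py; infer_instance

-- ===== CLAIM (what is proved, stated in full; the proofs are below) =====
def Claim_equal_guess_ingredient_category_py : Prop := ∀ (ingredient_name : String), Dom_guess_ingredient_category_py ingredient_name → Spec_guess_ingredient_category_py ingredient_name (guess_ingredient_category_py ingredient_name)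

-- ===== LEMMAS AND PROOFS =====

-- Folding the overwrite step over one category group (all pairs carry the same
-- category) starting from acc equals folding the rest from
-- `if any word of the group occurs then cat else acc`.
theorem pv_group_fold (s : String) (ws : List String) (cat : String)
    (rest : List (String × String)) (acc : String) :
    List.foldl (fun category p => if PySem.Str.isIn p.1 s then p.2 else category) acc
      (ws.map (fun w => (w, cat)) ++ rest) =
    List.foldl (fun category p => if PySem.Str.isIn p.1 s then p.2 else category)
      (if ws.any (fun w => PySem.Str.isIn w s) then cat else acc) rest := by
  induction ws generalizing acc with
  | nil => simp
  | cons w ws ih =>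
    simp only [List.map_cons, List.cons_append, List.foldl_cons, List.any_cons]
    rw [ih]
    rcases Bool.eq_false_or_eq_true (ws.any fun w => PySem.Str.isIn w s) with hws | hws <;>
      rcases Bool.eq_false_or_eq_true (PySem.Str.isIn w s) with hw | hw <;>
        (simp only [hw, hws]; simp)

-- ===== VERDICT (by name: the statement is the Claim_ definition above) =====
theorem guess_ingredient_category_py_spec : Claim_equal_guess_ingredient_category_py := by
  intro ingredient_name _
  unfold Spec_guess_ingredient_category_py guess_ingredient_category_py guess_ingredient_category_py_alt
  have hL : pvKeywords =
      (["sugar", "honey", "syrup"].map (fun w => (w, "sweetener")) ++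
      (["salt", "pepper", "garlic", "basil", "oregano"].map (fun w => (w, "seasoning")) ++
      (["oil", "olive oil", "coconut oil"].map (fun w => (w, "oil")) ++
      (["flour", "rice", "pasta", "bread", "oats"].map (fun w => (w, "grain")) ++
      (["tomato", "onion", "carrot", "celery", "pepper"].map (fun w => (w, "vegetable")) ++
      (["milk", "cheese", "butter", "cream", "yogurt"].map (fun w => (w, "dairy")) ++
      (["chicken", "beef", "pork", "fish", "turkey", "bacon"].map (fun w => (w, "protein")) ++
      []))))))) := rfl
  rw [hL]
  rw [pv_group_fold, pv_group_fold, pv_group_fold, pv_group_fold, pv_group_fold,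
      pv_group_fold, pv_group_fold]
  simp only [List.foldl_nil]
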